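-- pv_equiv track=rewrite | github.com/PraMamba/cell-o1 | eval/cell_type/simplified_confusion_matrix.py | filter_to_gt_classes_only
-- ===== SOURCE A (Python) =====
-- from typing import Dict, List, Tuple, Set
--
-- def is_format_error(prediction: str) -> bool:
--     """
--     Check if a prediction contains format errors.
--
--     Args:
--         prediction: Cell type prediction string
--
--     Returns:
--         True if contains format errors
--     """
--     error_patterns = [
--         '</think>',
--         '<think>',
--         '</answer>',
--         '<answer>',
--         'Final answer:',
--         'Cell 1',
--         'Cell 2',
--         'Cell 3',
--         'Cell 4',
--         'Cell 5'
--     ]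
--
--     for pattern in error_patterns:
--         if pattern in prediction:
--             return True
--
--     return False
--
-- def filter_to_gt_classes_only(
--     y_true: List[str],
--     y_pred: List[str],
--     dataset: str = "A013"
-- ) -> Tuple[List[str], List[str], Dict]:
--     """
--     Show only ground truth classes on prediction axis.
--
--     Args:
--         y_true: Ground truth labels
--         y_pred: Predicted labels
--         dataset: Dataset identifier
--
--     Returns:
--         Tuple of (y_true, filtered_y_pred, stats)
--     """
--     gt_classes = set(y_true)
--
--     filtered_y_pred = []
--     for pred in y_pred:
--         if is_format_error(pred):
--             filtered_y_pred.append("[Format Error]")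
--         elif pred in gt_classes:
--             filtered_y_pred.append(pred)
--         else:
--             filtered_y_pred.append("[Other Predictions]")
--
--     stats = {
--         "gt_classes": len(gt_classes),
--         "total_pred_classes": len(set(y_pred)),
--         "other_count": sum(1 for p in filtered_y_pred if p == "[Other Predictions]"),
--         "format_error_count": sum(1 for p in filtered_y_pred if p == "[Format Error]")
--     }
--
--     return y_true, filtered_y_pred, stats
-- ===== SOURCE B (Python) =====
-- from typing import Dict, List, Tuple, Set
--
-- def is_format_error(prediction: str) -> bool:
--     error_patterns = [
--         '</think>',
--         '<think>',
--         '</answer>',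
--         '<answer>',
--         'Final answer:',
--         'Cell 1',
--         'Cell 2',
--         'Cell 3',
--         'Cell 4',
--         'Cell 5'
--     ]
--     for pattern in error_patterns:
--         if pattern in prediction:
--             return True
--     return False
--
-- def filter_to_gt_classes_only(
--     y_true: List[str],
--     y_pred: List[str],
--     dataset: str = "A013"
-- ) -> Tuple[List[str], List[str], Dict]:
--     """Classify each DISTINCT prediction exactly once (memo table label_of)
--     and count multiplicities per distinct prediction (counts); the filtered
--     list is a lookup-map of y_pred through the memo table, and the two stats
--     counts are multiplicity-weighted sums over the distinct predictions —
--     no per-element re-classification and no scan of the filtered list."""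
--     gt_classes = set(y_true)
--
--     label_of = {}   # distinct prediction -> bucket label, decided once
--     counts = {}     # distinct prediction -> multiplicity in y_pred
--     for pred in y_pred:
--         if pred not in label_of:
--             if is_format_error(pred):
--                 label_of[pred] = "[Format Error]"
--             elif pred in gt_classes:
--                 label_of[pred] = pred
--             else:
--                 label_of[pred] = "[Other Predictions]"
--         counts[pred] = counts.get(pred, 0) + 1
--
--     filtered_y_pred = [label_of[p] for p in y_pred]
--
--     stats = {
--         "gt_classes": len(gt_classes),
--         "total_pred_classes": len(counts),
--         "other_count": sum(c for p, c in counts.items()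
--                            if label_of[p] == "[Other Predictions]"),
--         "format_error_count": sum(c for p, c in counts.items()
--                                   if label_of[p] == "[Format Error]"),
--     }
--     return y_true, filtered_y_pred, stats
-- ===== Notes on version B (the rewrite author's own statement) =====
-- stated objective: alternative
-- what changed: B classifies each DISTINCT prediction once into a memo dict and counts multiplicities per distinct prediction, then derives the filtered list by table lookup and the stats by multiplicity-weighted sums over the distinct keys, instead of A's per-element substring classification plus two full re-scans of the filtered list; it trades A's re-scans for dict bookkeeping and only wins on duplicate-heavy inputs.
import Mathlib
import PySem

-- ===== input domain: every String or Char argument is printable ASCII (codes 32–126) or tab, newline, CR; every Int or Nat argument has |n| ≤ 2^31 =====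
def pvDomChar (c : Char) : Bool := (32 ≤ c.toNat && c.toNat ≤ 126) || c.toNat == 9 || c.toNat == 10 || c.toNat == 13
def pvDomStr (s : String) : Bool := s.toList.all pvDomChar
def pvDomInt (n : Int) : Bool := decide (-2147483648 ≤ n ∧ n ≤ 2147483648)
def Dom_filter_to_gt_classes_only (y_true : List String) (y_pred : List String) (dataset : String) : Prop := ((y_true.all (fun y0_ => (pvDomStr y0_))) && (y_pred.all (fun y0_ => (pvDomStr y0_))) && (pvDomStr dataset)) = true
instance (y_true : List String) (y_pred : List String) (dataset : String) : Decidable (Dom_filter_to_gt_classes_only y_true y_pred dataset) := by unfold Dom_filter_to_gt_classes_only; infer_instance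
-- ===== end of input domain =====

-- B classifies each distinct prediction once into a memo dict with per-key multiplicities,
-- then derives the filtered list by table lookup and the stats by weighted sums over distinct keys
-- (objective: alternative decomposition; classification runs once per distinct prediction).


-- ===== PORT A =====
def pvErrorPatterns : List String :=
  ["</think>", "<think>", "</answer>", "<answer>", "Final answer:",
   "Cell 1", "Cell 2", "Cell 3", "Cell 4", "Cell 5"]

-- 'for pattern in error_patterns: if pattern in prediction: return True' / 'return False'
def is_format_error (prediction : String) : Bool :=
  pvErrorPatterns.any (fun pattern => PySem.Str.isIn pattern prediction)

def filter_to_gt_classes_only (y_true : List String) (y_pred : List String) (dataset : String) : List String × List String × (List (String × Int)) :=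
  let gt_classes : PySem.Set String := PySem.Set.ofList y_true
  let filtered_y_pred : List String :=
    y_pred.foldl (fun acc pred =>
      acc ++ [if is_format_error pred then "[Format Error]"
              else if PySem.Set.contains gt_classes pred then pred
              else "[Other Predictions]"]) []
  let stats : List (String × Int) :=
    [("gt_classes", PySem.Set.len gt_classes),
     ("total_pred_classes", PySem.Set.len (PySem.Set.ofList y_pred)),
     ("other_count",
       filtered_y_pred.foldl
         (fun acc p => if (p == "[Other Predictions]") then acc + 1 else acc) (0 : Int)),
     ("format_error_count",
       filtered_y_pred.foldl
         (fun acc p => if (p == "[Format Error]") then acc + 1 else acc) (0 : Int))]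
  (y_true, filtered_y_pred, stats)

-- ===== PORT B =====
-- the single loop of Source B: state = (label_of, counts)
def pvStepB (gt_classes : PySem.Set String)
    (st : PySem.Dict String String × PySem.Dict String Int) (pred : String) :
    PySem.Dict String String × PySem.Dict String Int :=
  let label_of :=
    if st.1.contains pred then st.1
    else if is_format_error pred then st.1.insert pred "[Format Error]"
    else if PySem.Set.contains gt_classes pred then st.1.insert pred pred
    else st.1.insert pred "[Other Predictions]"
  (label_of, st.2.insert pred (st.2.getD pred 0 + 1))

def filter_to_gt_classes_only_alt (y_true : List String) (y_pred : List String) (dataset : String) : List String × List String × (List (String × Int)) :=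
  let gt_classes : PySem.Set String := PySem.Set.ofList y_true
  let st := y_pred.foldl (pvStepB gt_classes) (PySem.Dict.empty, PySem.Dict.empty)
  let label_of := st.1
  let counts := st.2
  -- label_of[p]: the key is always present when p ∈ y_pred, so the total getD form is exact
  let filtered_y_pred := y_pred.map (fun p => label_of.getD p "")
  (y_true, filtered_y_pred,
   [("gt_classes", PySem.Set.len gt_classes),
    ("total_pred_classes", (counts.size : Int)),
    ("other_count",
      counts.items.foldl (fun acc pc =>
        if (label_of.getD pc.1 "" == "[Other Predictions]") then acc + pc.2 else acc) (0 : Int)),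
    ("format_error_count",
      counts.items.foldl (fun acc pc =>
        if (label_of.getD pc.1 "" == "[Format Error]") then acc + pc.2 else acc) (0 : Int))])

-- ===== PRECONDITION & SPEC =====
def Spec_filter_to_gt_classes_only (y_true : List String) (y_pred : List String) (dataset : String) (out : List String × List String × (List (String × Int))) : Prop := out = filter_to_gt_classes_only_alt y_true y_pred dataset
instance (y_true : List String) (y_pred : List String) (dataset : String) (out : List String × List String × (List (String × Int))) : Decidable (Spec_filter_to_gt_classes_only y_true y_pred dataset out) := by unfold Spec_filter_to_gt_classes_only; infer_instance

-- ===== CLAIM (what is proved, stated in full; the proofs are below) =====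
def Claim_equal_filter_to_gt_classes_only : Prop := ∀ (y_true : List String) (y_pred : List String) (dataset : String), Dom_filter_to_gt_classes_only y_true y_pred dataset → Spec_filter_to_gt_classes_only y_true y_pred dataset (filter_to_gt_classes_only y_true y_pred dataset)

-- ===== LEMMAS AND PROOFS =====

-- A's per-element classification, as a named function (definitionally A's if-chain)
def pvBucket (gt : PySem.Set String) (p : String) : String :=
  if is_format_error p then "[Format Error]"
  else if PySem.Set.contains gt p then p
  else "[Other Predictions]"

-- the label_of fold of B, named for the lemmas
def pvLoFold (gt : PySem.Set String) (l : List String) : PySem.Dict String String :=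
  l.foldl (fun d p => if d.contains p then d else d.insert p (pvBucket gt p)) PySem.Dict.empty

-- B's pair fold splits into two independent folds
theorem pvFold_split (gt : PySem.Set String) (l : List String)
    (d1 : PySem.Dict String String) (d2 : PySem.Dict String Int) :
    l.foldl (pvStepB gt) (d1, d2) =
      (l.foldl (fun d p => if d.contains p then d else d.insert p (pvBucket gt p)) d1,
       l.foldl (fun d p => d.insert p (d.getD p 0 + 1)) d2) := by
  induction l generalizing d1 d2 with
  | nil => rfl
  | cons x xs ih =>
    simp only [List.foldl_cons, pvStepB, pvBucket]
    split_ifs <;> exact ih _ _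

-- B's fold from the empty state: memo table and Counter
theorem pvFold_split_empty (gt : PySem.Set String) (l : List String) :
    l.foldl (pvStepB gt) (PySem.Dict.empty, PySem.Dict.empty) =
      (pvLoFold gt l, PySem.Dict.counter l) := by
  rw [pvFold_split, pvLoFold, PySem.Dict.foldl_insert_getD_add_one_eq_counter]

-- the memo table's lookup: hit = stored value, miss = bucket if seen in l
theorem pvLo_get? (gt : PySem.Set String) (l : List String) (d : PySem.Dict String String) (q : String) :
    (l.foldl (fun d p => if d.contains p then d else d.insert p (pvBucket gt p)) d).get? q =
      match d.get? q with
      | some v => some v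
      | none => if q ∈ l then some (pvBucket gt q) else none := by
  induction l generalizing d with
  | nil => cases h : d.get? q <;> simp [h]
  | cons x xs ih =>
    simp only [List.foldl_cons]
    by_cases hc : d.contains x = true
    · rw [if_pos hc, ih]
      by_cases hq : q = x
      · subst hq
        have : (d.get? q).isSome := by rw [← PySem.Dict.contains_eq_isSome_get?]; exact hc
        rcases Option.isSome_iff_exists.mp this with ⟨v, hv⟩
        simp [hv]
      · cases h : d.get? q <;> simp [hq]
    · rw [if_neg hc, ih, PySem.Dict.get?_insert d x q _]
      by_cases hq : q = x
      · subst hq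
        have hn : d.get? q = none := by
          rw [PySem.Dict.get?_eq_none_iff_contains]; simpa using hc
        simp [hn]
      · cases h : d.get? q <;> simp [hq]

theorem pvLo_getD_of_mem (gt : PySem.Set String) (l : List String) (q : String) (hq : q ∈ l) :
    (pvLoFold gt l).getD q "" = pvBucket gt q := by
  rw [pvLoFold, PySem.Dict.getD_eq_get?_getD, pvLo_get? gt l PySem.Dict.empty q]
  simp [PySem.Dict.get?_empty, hq]

-- a guarded accumulating fold over pairs is init + the filtered sum
theorem pvFoldl_add_if (P : String × Int → Bool) (l : List (String × Int)) (init : Int) :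
    l.foldl (fun acc pc => if P pc then acc + pc.2 else acc) init =
      init + ((l.filter P).map (·.2)).sum := by
  induction l generalizing init with
  | nil => simp
  | cons x xs ih =>
    by_cases h : P x
    · simp [h, ih, add_assoc]
    · simp [h, ih]

-- count of a bucket over the whole list = multiplicity-weighted sum over its distinct elements
theorem pvCountP_eq_sum (l : List String) (P : String → Bool) :
    ((((PySem.Set.ofList l).filter P).map (fun k => (l.count k : Int))).sum) = (l.countP P : Int) := by
  have hperm : (PySem.Set.ofList l).Perm l.dedup := by
    apply (List.perm_ext_iff_of_nodup (PySem.Set.nodup_ofList l) (List.nodup_dedup l)).mpr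
    intro x
    rw [PySem.Set.mem_ofList, List.mem_dedup]
  have h2 : ((l.dedup.filter P).map (fun k => (l.count k : Int))).sum =
      (((l.dedup.filter P).map (fun k => l.count k)).sum : Int) := by
    rw [Nat.cast_list_sum, List.map_map]; rfl
  calc ((((PySem.Set.ofList l).filter P).map (fun k => (l.count k : Int))).sum)
      = ((l.dedup.filter P).map (fun k => (l.count k : Int))).sum :=
        ((hperm.filter P).map _).sum_eq
    _ = (((l.dedup.filter P).map (fun k => l.count k)).sum : Int) := h2
    _ = (l.countP P : Int) := by rw [List.sum_map_count_dedup_filter_eq_countP]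

-- one stats counter of B equals A's scan of the filtered list
theorem pvStat (gt : PySem.Set String) (l : List String) (lab : String) :
    ((PySem.Dict.counter l).items.foldl
        (fun acc pc => if ((pvLoFold gt l).getD pc.1 "" == lab) then acc + pc.2 else acc) (0 : Int))
      = ((l.map (pvBucket gt)).countP (· == lab) : Int) := by
  rw [pvFoldl_add_if, PySem.Dict.items_counter, List.filter_map, List.map_map]
  have hfc : (PySem.Set.ofList l).filter
        ((fun pc : String × Int => ((pvLoFold gt l).getD pc.1 "" == lab)) ∘
          (fun k => (k, (l.count k : Int))))
      = (PySem.Set.ofList l).filter (fun k => (pvBucket gt k == lab)) := by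
    apply List.filter_congr
    intro k hk
    simp only [Function.comp]
    rw [pvLo_getD_of_mem gt l k ((PySem.Set.mem_ofList _ _).mp hk)]
  rw [hfc]
  have hm : ((fun pc : String × Int => pc.2) ∘ (fun k => (k, (l.count k : Int))))
      = (fun k => (l.count k : Int)) := rfl
  rw [hm, List.countP_map, pvCountP_eq_sum, zero_add]
  rfl

-- ===== VERDICT (by name: the statement is the Claim_ definition above) =====
theorem filter_to_gt_classes_only_spec : Claim_equal_filter_to_gt_classes_only := by
  intro y_true y_pred dataset _
  show _ = _
  simp only [filter_to_gt_classes_only, filter_to_gt_classes_only_alt, pvFold_split_empty]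
  have hfilt : (y_pred.foldl (fun acc pred =>
      acc ++ [if is_format_error pred then "[Format Error]"
              else if PySem.Set.contains (PySem.Set.ofList y_true) pred then pred
              else "[Other Predictions]"]) [])
      = y_pred.map (pvBucket (PySem.Set.ofList y_true)) := by
    rw [PySem.List.foldl_append_singleton_eq_map]; rfl
  have hlook : (y_pred.map (fun p => (pvLoFold (PySem.Set.ofList y_true) y_pred).getD p ""))
      = y_pred.map (pvBucket (PySem.Set.ofList y_true)) :=
    List.map_congr_left (fun q hq => pvLo_getD_of_mem _ y_pred q hq)
  have hsize : (PySem.Dict.counter y_pred).size = (PySem.Set.ofList y_pred).length := by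
    rw [← PySem.Dict.keys_counter]
    exact (List.length_map _).symm
  rw [hfilt, hlook, hsize, pvStat, pvStat,
    PySem.List.foldl_count_if, PySem.List.foldl_count_if]
  simp only [zero_add]
  rfl
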